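-- pv_equiv track=rewrite | github.com/BhavMohan/BLAST | standalone_blast_app/app.py | min_unique_window
-- ===== SOURCE A (Python) =====
-- from typing import List, Optional, Tuple, Dict
--
-- def min_unique_window(ref: str, windows: List[str], mode: str) -> Optional[Tuple[int, int]]:
--     L = len(ref)
--     N = len(windows)
--     for k in range(1, L + 1):
--         for s in range(0, L - k + 1):
--             ref_sub = ref[s : s + k]
--             found_match = False
--             for h in range(N):
--                 hit_sub = windows[h][s : s + k]
--                 if mode == 'conservative':
--                     if '?' in hit_sub:
--                         found_match = True
--                         break
--                     if all(a.upper() == b.upper() for a, b in zip(hit_sub, ref_sub)):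
--                         found_match = True
--                         break
--                 else:
--                     if '?' in hit_sub:
--                         continue
--                     if all(a.upper() == b.upper() for a, b in zip(hit_sub, ref_sub)):
--                         found_match = True
--                         break
--             if not found_match:
--                 return (s, k)
--     return None
-- ===== SOURCE B (Python) =====
-- from typing import List, Optional, Tuple
--
-- def min_unique_window(ref: str, windows: List[str], mode: str) -> Optional[Tuple[int, int]]:
--     L = len(ref)
--     R = ref.upper()
--     cons = (mode == 'conservative')
--     # Per-window prefix sums: q[i] = '?'-count of w[:i], m[i] = count of
--     # positions j < i that case-insensitively match ref (positions past len(ref) never match).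
--     pres = []
--     for w in windows:
--         W = w.upper()
--         n = len(w)
--         q = [0]
--         m = [0]
--         for i in range(n):
--             q.append(q[i] + (1 if w[i] == '?' else 0))
--             m.append(m[i] + (1 if i < L and W[i] == R[i] else 0))
--         pres.append((n, q, m))
--     for k in range(1, L + 1):
--         for s in range(0, L - k + 1):
--             found = False
--             for (n, q, m) in pres:
--                 lo = min(s, n)
--                 e = min(s + k, n)
--                 hasq = q[e] - q[lo] > 0
--                 alleq = (m[e] - m[lo]) == (e - lo)
--                 if (hasq or alleq) if cons else ((not hasq) and alleq):
--                     found = True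
--                     break
--             if not found:
--                 return (s, k)
--     return None
-- ===== Notes on version B (the rewrite author's own statement) =====
-- stated objective: faster
-- what changed: Replaces the per-(s,k) rescan of every window substring by per-window prefix-sum arrays of '?'-counts and case-insensitive match counts, so each window check inside the (k,s) search is O(1) instead of O(k); intended as faster (O(L^2*N) vs O(L^3*N)); measured about 3x at n=1024, the largest size both finished in a timing run.
import Mathlib
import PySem

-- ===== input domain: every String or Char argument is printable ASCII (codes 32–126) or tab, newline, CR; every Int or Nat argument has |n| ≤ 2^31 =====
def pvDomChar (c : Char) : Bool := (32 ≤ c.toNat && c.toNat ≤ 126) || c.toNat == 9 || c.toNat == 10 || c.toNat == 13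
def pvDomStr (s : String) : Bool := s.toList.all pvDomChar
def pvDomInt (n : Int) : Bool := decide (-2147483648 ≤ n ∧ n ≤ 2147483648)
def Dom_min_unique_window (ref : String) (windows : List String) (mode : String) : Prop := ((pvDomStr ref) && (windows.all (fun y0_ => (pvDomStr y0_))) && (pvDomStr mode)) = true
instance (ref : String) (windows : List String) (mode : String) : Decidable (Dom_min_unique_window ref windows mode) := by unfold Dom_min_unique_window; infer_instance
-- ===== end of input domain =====

-- B replaces A's per-(s,k) rescan of every window substring by per-window prefix sums of
-- '?'-counts and case-insensitive match counts, making each window check O(1); intended as faster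
-- (measured about 3x at n=1024, the largest size both finished in a timing run).


-- ===== PORT A =====
-- per-window body of A's inner loop: True = found_match (break), on the slices hit = windows[h][s:s+k], rsub = ref[s:s+k]
def pvAmatch (mode : String) (rsub hit : List Char) : Bool :=
  if mode == "conservative" then
    if PySem.Chars.isIn ['?'] hit then true
    else (hit.zip rsub).all (fun ab => PySem.Chars.upperChar ab.1 == PySem.Chars.upperChar ab.2)
  else
    if PySem.Chars.isIn ['?'] hit then false
    else (hit.zip rsub).all (fun ab => PySem.Chars.upperChar ab.1 == PySem.Chars.upperChar ab.2)

def min_unique_window (ref : String) (windows : List String) (mode : String) : Option (Int × Int) :=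
  let L : Int := PySem.Str.len ref
  (PySem.List.pyRange 1 (L + 1) 1).findSome? (fun k =>
    (PySem.List.pyRange 0 (L - k + 1) 1).findSome? (fun s =>
      let rsub := PySem.List.slice ref.toList (some s) (some (s + k))
      let found := windows.any (fun w =>
        pvAmatch mode rsub (PySem.List.slice w.toList (some s) (some (s + k))))
      if found then none else some (s, k)))

-- ===== PORT B =====
-- Source B's per-window prefix-sum loop: returns (q, m) with q[i] = '?'-count of w[:i],
-- m[i] = matches of W[j]==R[j] for j < i; R' is R (= ref.upper()) already advanced to position i.
def pvBuild : List Char → List Char → Int → Int → List Int × List Int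
  | _, [], qa, ma => ([qa], [ma])
  | R', c :: cs, qa, ma =>
    let qa' := qa + (if c == '?' then 1 else 0)
    let ma' := ma + (match R' with
      | r :: _ => if PySem.Chars.upperChar c == r then 1 else 0
      | [] => 0)
    let rest := pvBuild R'.tail cs qa' ma'
    (qa :: rest.1, ma :: rest.2)

-- Source B's O(1) per-window check from the prefix sums
def pvBcheck (cons : Bool) (s k : Int) (p : Int × List Int × List Int) : Bool :=
  let n := p.1
  let q := p.2.1
  let m := p.2.2
  let lo := min s n
  let e := min (s + k) n
  let hasq := PySem.List.pyGetD q e 0 - PySem.List.pyGetD q lo 0 > 0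
  let alleq := (PySem.List.pyGetD m e 0 - PySem.List.pyGetD m lo 0) == (e - lo)
  if cons then hasq || alleq else (!hasq) && alleq

def min_unique_window_alt (ref : String) (windows : List String) (mode : String) : Option (Int × Int) :=
  let L : Int := PySem.Str.len ref
  let R := PySem.Chars.upper ref.toList
  let cons := mode == "conservative"
  let pres := windows.map (fun w => ((PySem.Str.len w : Int), pvBuild R w.toList 0 0))
  (PySem.List.pyRange 1 (L + 1) 1).findSome? (fun k =>
    (PySem.List.pyRange 0 (L - k + 1) 1).findSome? (fun s =>
      if pres.any (pvBcheck cons s k) then none else some (s, k)))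

-- ===== PRECONDITION & SPEC =====
def Spec_min_unique_window (ref : String) (windows : List String) (mode : String) (out : Option (Int × Int)) : Prop := out = min_unique_window_alt ref windows mode
instance (ref : String) (windows : List String) (mode : String) (out : Option (Int × Int)) : Decidable (Spec_min_unique_window ref windows mode out) := by unfold Spec_min_unique_window; infer_instance

-- ===== CLAIM (what is proved, stated in full; the proofs are below) =====
def Claim_equal_min_unique_window : Prop := ∀ (ref : String) (windows : List String) (mode : String), Dom_min_unique_window ref windows mode → Spec_min_unique_window ref windows mode (min_unique_window ref windows mode)

-- ===== LEMMAS AND PROOFS =====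

-- '?'-count and case-insensitive match-count that B's prefix sums tabulate
def pvQc (l : List Char) : Nat := l.countP (· == '?')
def pvMc (R l : List Char) : Nat := (l.zip R).countP (fun ab => PySem.Chars.upperChar ab.1 == ab.2)

theorem pvBuild_q (R cs : List Char) (qa ma : Int) (j : Nat) (hj : j ≤ cs.length) :
    (pvBuild R cs qa ma).1.getD j 0 = qa + (pvQc (cs.take j) : Int) := by
  induction cs generalizing R qa ma j with
  | nil =>
    simp only [List.length_nil, Nat.le_zero] at hj
    subst hj; simp [pvBuild, pvQc]
  | cons c cs ih =>
    cases j with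
    | zero => simp [pvBuild, pvQc]
    | succ j =>
      simp only [pvBuild, List.getD_cons_succ, List.take_succ_cons]
      rw [ih _ _ _ _ (by simpa using hj)]
      simp only [pvQc, List.countP_cons]
      split_ifs with h <;> simp [h] <;> push_cast <;> ring

theorem pvBuild_m (R cs : List Char) (qa ma : Int) (j : Nat) (hj : j ≤ cs.length) :
    (pvBuild R cs qa ma).2.getD j 0 = ma + (pvMc R (cs.take j) : Int) := by
  induction cs generalizing R qa ma j with
  | nil =>
    simp only [List.length_nil, Nat.le_zero] at hj
    subst hj; simp [pvBuild, pvMc]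
  | cons c cs ih =>
    cases j with
    | zero => simp [pvBuild, pvMc]
    | succ j =>
      simp only [pvBuild, List.getD_cons_succ, List.take_succ_cons]
      rw [ih _ _ _ _ (by simpa using hj)]
      cases R with
      | nil => simp [pvMc]
      | cons r rs =>
        simp only [pvMc, List.zip_cons_cons, List.countP_cons, List.tail_cons]
        split_ifs with h <;> simp <;> push_cast <;> ring

theorem pvQc_split (cs : List Char) (a d : Nat) :
    pvQc (cs.take (a + d)) = pvQc (cs.take a) + pvQc ((cs.drop a).take d) := by
  rw [List.take_add, pvQc, List.countP_append]; rfl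

theorem pvMc_split (R cs : List Char) (a d : Nat) :
    pvMc R (cs.take (a + d)) = pvMc R (cs.take a) + pvMc (R.drop a) ((cs.drop a).take d) := by
  induction a generalizing R cs with
  | zero => simp [pvMc]
  | succ a ih =>
    cases cs with
    | nil => simp [pvMc]
    | cons c cs =>
      cases R with
      | nil => simp [pvMc, List.zip_nil_right]
      | cons r rs =>
        simp only [Nat.succ_add, List.take_succ_cons, List.drop_succ_cons, pvMc,
          List.zip_cons_cons, List.countP_cons]
        have := ih rs cs
        simp only [pvMc] at this
        omega

theorem pv_zip_take_right {α β : Type} (l : List α) (r : List β) (j : Nat) (h : l.length ≤ j) :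
    l.zip (r.take j) = l.zip r := by
  induction l generalizing r j with
  | nil => simp
  | cons a l ih =>
    cases r with
    | nil => simp
    | cons b r =>
      cases j with
      | zero => simp at h
      | succ j => simp only [List.take_succ_cons, List.zip_cons_cons]
                  rw [ih r j (by simpa using h)]

theorem pv_isIn_singleton (c : Char) (l : List Char) :
    PySem.Chars.isIn [c] l = l.contains c := by
  by_cases hm : c ∈ l
  · have h1 : PySem.Chars.isIn [c] l = true := by
      rw [PySem.Chars.isIn_iff_infix]
      obtain ⟨s, t, rfl⟩ := List.append_of_mem hm
      exact ⟨s, t, by simp⟩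
    simp [h1, List.contains_eq_mem, hm]
  · have h1 : PySem.Chars.isIn [c] l = false := by
      rw [PySem.Chars.isIn_eq_false_iff]
      intro hinf; exact hm (hinf.subset (List.mem_singleton_self c))
    simp [h1, List.contains_eq_mem, hm]

theorem pv_all_count {α : Type} (l : List (α × α)) (p : α × α → Bool) :
    l.all p = (l.countP p == l.length) := by
  rcases hall : l.all p with _ | _
  · simp only [List.all_eq_false] at hall
    obtain ⟨x, hx, hpx⟩ := hall
    have hle : l.countP p ≤ l.length := List.countP_le_length
    have hne : l.countP p ≠ l.length := fun he => by
      have := List.countP_eq_length.mp he x hx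
      simp [hpx] at this
    simp [hne]
  · simp only [List.all_eq_true] at hall
    rw [List.countP_eq_length.mpr (fun a ha => by simp [hall a ha])]
    simp

theorem pv_key (mode : String) (refL : List Char) (w : String) (s k : Int)
    (hs : 0 ≤ s) (hk : 0 < k) (hsk : s + k ≤ refL.length) :
    pvAmatch mode (PySem.List.slice refL (some s) (some (s + k)))
        (PySem.List.slice w.toList (some s) (some (s + k)))
      = pvBcheck (mode == "conservative") s k
          ((PySem.Str.len w : Int), pvBuild (PySem.Chars.upper refL) w.toList 0 0) := by
  have hslice_w : PySem.List.slice w.toList (some s) (some (s + k))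
      = (w.toList.drop s.toNat).take k.toNat := by
    rw [PySem.List.slice_toNat _ hs (by omega)]
    congr 1; omega
  have hslice_ref : PySem.List.slice refL (some s) (some (s + k))
      = (refL.drop s.toNat).take k.toNat := by
    rw [PySem.List.slice_toNat _ hs (by omega)]
    congr 1; omega
  set cs := w.toList with hcs
  set n := cs.length with hn
  set sN := s.toNat with hsN
  set kN := k.toNat with hkN
  set lo' := min sN n with hlo'
  set en := min (sN + kN) n with hen
  set seg := (cs.drop lo').take (en - lo') with hseg
  -- the Int-side indices are the casts of the Nat-side ones
  have hsInt : (sN : Int) = s := Int.toNat_of_nonneg hs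
  have hkInt : (kN : Int) = k := Int.toNat_of_nonneg (le_of_lt hk)
  have heInt : min (s + k) ((n : Nat) : Int) = ((en : Nat) : Int) := by
    simp only [hen]; push_cast; omega
  have hloInt : min s ((n : Nat) : Int) = ((lo' : Nat) : Int) := by
    simp only [hlo']; push_cast; omega
  have hlo_le_en : lo' ≤ en := by omega
  have hen_le_n : en ≤ n := by omega
  -- the slice of w equals seg
  have hhit : (cs.drop sN).take kN = seg := by
    by_cases hcase : n ≤ sN
    · have h1 : cs.drop sN = [] := List.drop_eq_nil_of_le hcase
      have h2 : cs.drop lo' = [] := List.drop_eq_nil_of_le (by omega)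
      rw [hseg, h1, h2]; simp
    · have hlo_eq : lo' = sN := by omega
      rw [hseg, hlo_eq, List.take_eq_take_iff]
      rw [List.length_drop]
      omega
  -- prefix-sum differences
  have hq : PySem.List.pyGetD (pvBuild (PySem.Chars.upper refL) cs 0 0).1 (min (s + k) ((n:Nat):Int)) 0
      - PySem.List.pyGetD (pvBuild (PySem.Chars.upper refL) cs 0 0).1 (min s ((n:Nat):Int)) 0
      = (pvQc seg : Int) := by
    rw [heInt, hloInt, PySem.List.pyGetD_natCast, PySem.List.pyGetD_natCast,
      pvBuild_q _ _ _ _ en hen_le_n, pvBuild_q _ _ _ _ lo' (by omega)]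
    have : en = lo' + (en - lo') := by omega
    rw [this, pvQc_split, ← hseg]
    push_cast
    omega
  have hm' : PySem.List.pyGetD (pvBuild (PySem.Chars.upper refL) cs 0 0).2 (min (s + k) ((n:Nat):Int)) 0
      - PySem.List.pyGetD (pvBuild (PySem.Chars.upper refL) cs 0 0).2 (min s ((n:Nat):Int)) 0
      = (pvMc ((PySem.Chars.upper refL).drop lo') seg : Int) := by
    rw [heInt, hloInt, PySem.List.pyGetD_natCast, PySem.List.pyGetD_natCast,
      pvBuild_m _ _ _ _ en hen_le_n, pvBuild_m _ _ _ _ lo' (by omega)]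
    have : en = lo' + (en - lo') := by omega
    rw [this, pvMc_split, ← hseg]
    push_cast
    omega
  have hseglen : seg.length = en - lo' := by
    rw [hseg, List.length_take, List.length_drop]; omega
  -- '?'-membership of the slice equals positivity of the prefix-sum difference
  have hQbool : PySem.Chars.isIn ['?'] ((cs.drop sN).take kN)
      = decide ((0:Int) < (pvQc seg : Int)) := by
    rw [hhit, pv_isIn_singleton, List.contains_eq_mem, decide_eq_decide, Int.natCast_pos,
      pvQc, List.countP_pos_iff]
    constructor
    · intro h; exact ⟨'?', h, by simp⟩
    · rintro ⟨a, ha, hpa⟩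
      simp only [beq_iff_eq] at hpa
      subst hpa; exact ha
  -- the all-zip check equals the match-count condition
  have hEqbool : (((cs.drop sN).take kN).zip ((refL.drop sN).take kN)).all
        (fun ab => PySem.Chars.upperChar ab.1 == PySem.Chars.upperChar ab.2)
      = decide ((pvMc ((PySem.Chars.upper refL).drop lo') seg : Int) = ((en:Nat):Int) - ((lo':Nat):Int)) := by
    have hnL : sN + kN ≤ refL.length := by omega
    by_cases hcase : n ≤ sN
    · have h1 : cs.drop sN = [] := List.drop_eq_nil_of_le hcase
      have h2 : seg = [] := by
        rw [hseg, List.drop_eq_nil_of_le (by omega : cs.length ≤ lo')]; simp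
      have h3 : en = n := by omega
      have h4 : lo' = n := by omega
      rw [h1, h2]
      simp [pvMc, h3, h4]
    · have hlo_eq : lo' = sN := by omega
      have hzip : ((cs.drop sN).take kN).zip ((refL.drop sN).take kN)
          = seg.zip (refL.drop sN) := by
        rw [hhit, pv_zip_take_right]
        rw [hseglen]; omega
      rw [hzip]
      have hupper : (PySem.Chars.upper refL).drop lo' = (refL.drop sN).map PySem.Chars.upperChar := by
        rw [hlo_eq]; simp [PySem.Chars.upper, List.map_drop]
      have hcnt : pvMc ((PySem.Chars.upper refL).drop lo') seg
          = (seg.zip (refL.drop sN)).countP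
              (fun ab => PySem.Chars.upperChar ab.1 == PySem.Chars.upperChar ab.2) := by
        rw [hupper, pvMc, List.zip_map_right, List.countP_map]
        rfl
      have hlen : (seg.zip (refL.drop sN)).length = seg.length := by
        rw [List.length_zip, List.length_drop]
        omega
      rw [pv_all_count, hcnt, hlen, hseglen]
      by_cases hall : (seg.zip (refL.drop sN)).countP
          (fun ab => PySem.Chars.upperChar ab.1 == PySem.Chars.upperChar ab.2) = en - lo'
      · rw [hall]; simp; omega
      · have : ¬ (((seg.zip (refL.drop sN)).countP
            (fun ab => PySem.Chars.upperChar ab.1 == PySem.Chars.upperChar ab.2) : Int)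
            = ((en:Nat):Int) - ((lo':Nat):Int)) := by
          push_cast; omega
        simp [hall, this]
  -- assemble
  rw [hslice_w, hslice_ref]
  simp only [pvAmatch, pvBcheck, PySem.Str.len_eq, ← hcs, ← hn]
  rw [hQbool, hEqbool, hq, hm']
  rcases hmode : (mode == "conservative") with _ | _
  · simp only [Bool.false_eq_true, if_false]
    rcases hdq : decide ((0:Int) < (pvQc seg : Int)) with _ | _
    · simp only [heInt, hloInt, Bool.beq_eq_decide_eq]; simp
    · simp only [heInt, hloInt, Bool.beq_eq_decide_eq]; simp
  · simp only [if_true]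
    rcases hdq : decide ((0:Int) < (pvQc seg : Int)) with _ | _
    · simp only [heInt, hloInt, Bool.beq_eq_decide_eq]; simp
    · simp only [heInt, hloInt, Bool.beq_eq_decide_eq]; simp

theorem pv_findSome?_congr {α β : Type} (l : List α) (f g : α → Option β)
    (h : ∀ a ∈ l, f a = g a) : l.findSome? f = l.findSome? g := by
  induction l with
  | nil => rfl
  | cons a l ih =>
    simp only [List.findSome?_cons, h a (List.mem_cons_self ..)]
    cases g a with
    | some b => rfl
    | none => exact ih (fun x hx => h x (List.mem_cons_of_mem _ hx))

-- ===== VERDICT (by name: the statement is the Claim_ definition above) =====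
theorem min_unique_window_spec : Claim_equal_min_unique_window := by
  intro ref windows mode _
  unfold Spec_min_unique_window min_unique_window min_unique_window_alt
  dsimp only
  apply pv_findSome?_congr
  intro k hk
  rw [PySem.List.mem_pyRange_one, PySem.Str.len_eq] at hk
  apply pv_findSome?_congr
  intro s hs
  rw [PySem.List.mem_pyRange_one] at hs
  rw [List.any_map]
  have hfun : (fun w => pvAmatch mode (PySem.List.slice ref.toList (some s) (some (s + k)))
        (PySem.List.slice w.toList (some s) (some (s + k))))
      = (pvBcheck (mode == "conservative") s k ∘ fun w =>
          (PySem.Str.len w, pvBuild (PySem.Chars.upper ref.toList) w.toList 0 0)) := by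
    funext w
    exact pv_key mode ref.toList w s k hs.1 (by omega)
      (by rw [PySem.Str.len_eq] at hs; omega)
  rw [hfun]
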